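-- pv_equiv track=rewrite | github.com/pabloramesc/advent-of-code-2025 | day2_part2.py | is_invalid_id
-- ===== SOURCE A (Python) =====
-- def is_invalid_id(num: int) -> bool:
--     digits = str(num)
--     size = len(digits)
--     for k in range(1, size // 2 + 1):
--         pattern = digits[:k]
--         times = size // len(pattern)
--         candidate = pattern * times
--         if candidate == digits:
--             return True
--     return False
-- ===== SOURCE B (Python) =====
-- def is_invalid_id(num: int) -> bool:
--     s = str(num)
--     return len(s) > 1 and (s + s).find(s, 1) < len(s)
-- ===== Notes on version B (the rewrite author's own statement) =====
-- stated objective: idiomatic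
-- what changed: Replaces the loop over candidate prefix lengths (rebuilding pattern*times for each k) by the classic doubled-string trick: s is a repetition of a proper prefix iff s occurs in s+s at some position strictly between the start and its length.
import Mathlib
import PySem

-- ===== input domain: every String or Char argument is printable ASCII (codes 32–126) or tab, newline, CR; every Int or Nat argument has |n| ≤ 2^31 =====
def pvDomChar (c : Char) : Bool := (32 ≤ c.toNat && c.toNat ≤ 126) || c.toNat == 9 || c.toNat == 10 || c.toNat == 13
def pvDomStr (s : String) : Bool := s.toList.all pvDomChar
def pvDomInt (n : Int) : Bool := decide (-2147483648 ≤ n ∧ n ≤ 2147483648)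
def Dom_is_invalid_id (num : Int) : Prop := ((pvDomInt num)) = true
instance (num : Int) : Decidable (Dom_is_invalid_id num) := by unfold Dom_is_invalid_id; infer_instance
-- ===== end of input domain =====

-- B replaces A's loop over candidate prefix lengths by the doubled-string trick
-- (`len(s) > 1 and (s + s).find(s, 1) < len(s)`); objective: idiomatic, return value identical.

-- ===== PORT A =====
def is_invalid_id (num : Int) : Bool :=
  let digits := PySem.Int.toChars num
  let size := PySem.Chars.len digits
  (PySem.List.pyRange 1 (PySem.Int.floordiv size 2 + 1) 1).any (fun k =>
    let pattern := PySem.Chars.slice digits none (some k)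
    let times := PySem.Int.floordiv size (PySem.Chars.len pattern)
    -- 'pattern * times': exact for times ≥ 0, and here times = size // k ≥ 0 always
    let candidate := (List.replicate times.toNat pattern).flatten
    candidate == digits)

-- ===== PORT B =====
def is_invalid_id_alt (num : Int) : Bool :=
  let s := PySem.Int.toChars num
  decide ((1 : Int) < PySem.Chars.len s) &&
    decide (PySem.Chars.findFrom (s ++ s) s 1 < PySem.Chars.len s)

-- ===== PRECONDITION & SPEC =====
def Spec_is_invalid_id (num : Int) (out : Bool) : Prop := out = is_invalid_id_alt num
instance (num : Int) (out : Bool) : Decidable (Spec_is_invalid_id num out) := by unfold Spec_is_invalid_id; infer_instance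

-- ===== CLAIM (what is proved, stated in full; the proofs are below) =====
def Claim_equal_is_invalid_id : Prop := ∀ (num : Int), Dom_is_invalid_id num → Spec_is_invalid_id num (is_invalid_id num)

-- ===== LEMMAS AND PROOFS =====

-- both programs decide this property of the digit string:
-- some nontrivial rotation fixes s (equivalently, s is a repetition of a proper prefix)
def hasProperRot (s : List Char) : Prop := ∃ p : Nat, 1 ≤ p ∧ p < s.length ∧ s.rotate p = s

-- an occurrence of s in s++s at position p ≤ |s| is exactly a rotation fixing s
lemma occ_iff_rot (s : List Char) (p : Nat) (hp : p ≤ s.length) :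
    s <+: (s ++ s).drop p ↔ s.rotate p = s := by
  have hdrop : (s ++ s).drop p = s.drop p ++ s := by
    rw [List.drop_append]
    simp [Nat.sub_eq_zero_of_le hp]
  rw [hdrop, List.prefix_iff_eq_take, List.take_append]
  have h1 : (s.drop p).length = s.length - p := by simp
  have h2 : s.length - (s.drop p).length = p := by omega
  rw [List.take_of_length_le (by simp), h2, List.rotate_eq_drop_append_take hp]
  exact eq_comm

-- the positions of rotations fixing s are closed under remainders: the least one divides
lemma rot_dvd (s : List Char) (d p : Nat) (hd : 0 < d) (h : s.rotate d = s) (hp : s.rotate p = s)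
    (hmin : ∀ i, 0 < i → i < d → s.rotate i ≠ s) : d ∣ p := by
  have rot_mul : ∀ a : Nat, s.rotate (a * d) = s := by
    intro a; induction a with
    | zero => simp
    | succ a ih => rw [Nat.succ_mul, ← List.rotate_rotate, ih, h]
  have hr : s.rotate (p % d) = s := by
    have h2 := List.rotate_rotate s (p / d * d) (p % d)
    rw [rot_mul (p / d), Nat.div_add_mod' p d, hp] at h2
    exact h2
  rcases Nat.eq_zero_or_pos (p % d) with h0 | h0
  · exact Nat.dvd_of_mod_eq_zero h0
  · exact absurd hr (hmin _ h0 (Nat.mod_lt _ hd))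

-- a rotation fixing s at a divisor of |s| makes s a power of its length-d prefix
lemma pow_of_rot (d : Nat) :
    ∀ (m : Nat) (s : List Char), s.length = m * d → s.rotate d = s →
      s = (List.replicate m (s.take d)).flatten := by
  intro m
  induction m with
  | zero =>
    intro s hlen _
    have : s = [] := List.length_eq_zero_iff.mp (by simpa using hlen)
    subst this; simp
  | succ m ih =>
    intro s hlen hrot
    rw [Nat.succ_mul] at hlen
    have hdlen : d ≤ s.length := by omega
    have hs : s = s.take d ++ s.drop d := (List.take_append_drop d s).symm
    have htl : (s.take d).length = d := by simp [hdlen]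
    have hul : (s.drop d).length = m * d := by simp; omega
    have hcomm : s.drop d ++ s.take d = s.take d ++ s.drop d := by
      rw [← List.rotate_eq_drop_append_take hdlen, hrot]; exact hs
    rcases Nat.eq_zero_or_pos m with hm0 | hm0
    · subst hm0
      have hnil : s.drop d = [] := List.length_eq_zero_iff.mp (by omega)
      have hst : s = s.take d := by conv_lhs => rw [hs, hnil, List.append_nil]
      simpa using hst
    · have hdu : d ≤ (s.drop d).length := by
        have : 1 * d ≤ m * d := Nat.mul_le_mul_right d hm0
        omega
      have hdt : (s.take d).drop d = [] := by simp
      have htu : (s.drop d).take d = s.take d := by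
        have h2 := congrArg (List.take d) hcomm
        rw [List.take_append, List.take_append] at h2
        simp only [Nat.sub_eq_zero_of_le hdu, Nat.sub_self, List.take_zero,
          List.append_nil, List.take_take, min_self, htl] at h2
        simpa using h2
      have hdrop : (s.drop d).drop d ++ s.take d = s.drop d := by
        have h2 := congrArg (List.drop d) hcomm
        rw [List.drop_append, List.drop_append] at h2
        simp only [Nat.sub_eq_zero_of_le hdu, Nat.sub_self, List.drop_zero, hdt, htl,
          List.nil_append] at h2
        exact h2
      have hrotu : (s.drop d).rotate d = s.drop d := by
        rw [List.rotate_eq_drop_append_take hdu, htu, hdrop]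
      have hu := ih (s.drop d) hul hrotu
      rw [htu] at hu
      calc s = s.take d ++ s.drop d := hs
        _ = s.take d ++ (List.replicate m (s.take d)).flatten := by rw [← hu]
        _ = (List.replicate (m + 1) (s.take d)).flatten := by rw [List.replicate_succ, List.flatten_cons]

-- conversely, a power of a word is fixed by rotating by that word's length
lemma rot_of_pow (t : List Char) (m : Nat) (hm : 1 ≤ m) :
    ((List.replicate m t).flatten).rotate t.length = (List.replicate m t).flatten := by
  obtain ⟨m', rfl⟩ : ∃ m', m = m' + 1 := ⟨m - 1, by omega⟩
  have hlen : t.length ≤ ((List.replicate (m' + 1) t).flatten).length := by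
    simp [List.length_flatten, Nat.succ_mul]
  rw [List.rotate_eq_drop_append_take hlen]
  conv_lhs => rw [List.replicate_succ, List.flatten_cons, List.drop_left, List.take_left]
  rw [List.replicate_succ', List.flatten_append]
  simp

-- A's loop body, characterized: some prefix length k ≤ n//2 with pattern*times = digits
lemma A_core_iff (s : List Char) :
    ((PySem.List.pyRange 1 (PySem.Int.floordiv (PySem.Chars.len s) 2 + 1) 1).any (fun k =>
      (List.replicate (PySem.Int.floordiv (PySem.Chars.len s)
          (PySem.Chars.len (PySem.Chars.slice s none (some k)))).toNat
        (PySem.Chars.slice s none (some k))).flatten == s)) = true ↔ hasProperRot s := by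
  have hfd2 : PySem.Int.floordiv (PySem.Chars.len s) 2 = ((s.length / 2 : Nat) : Int) := by
    rw [PySem.Chars.len_eq]
    exact_mod_cast PySem.Int.floordiv_natCast s.length 2
  rw [List.any_eq_true]
  constructor
  · rintro ⟨k, hkmem, hpred⟩
    rw [PySem.List.mem_pyRange_one] at hkmem
    obtain ⟨hk1, hk2⟩ := hkmem
    rw [hfd2] at hk2
    obtain ⟨kk, rfl⟩ : ∃ kk : Nat, k = (kk : Int) := ⟨k.toNat, by omega⟩
    have hkk1 : 1 ≤ kk := by omega
    have hkk2 : kk ≤ s.length / 2 := by omega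
    have h2k : 2 * kk ≤ s.length := by omega
    have hslice : PySem.Chars.slice s none (some (kk : Int)) = s.take kk := by
      rw [PySem.Chars.slice_eq_listSlice, PySem.List.slice_to_natCast]
    have htl : (s.take kk).length = kk := by simp; omega
    have htimes : PySem.Int.floordiv (PySem.Chars.len s)
        (PySem.Chars.len (PySem.Chars.slice s none (some (kk : Int)))) = ((s.length / kk : Nat) : Int) := by
      rw [hslice, PySem.Chars.len_eq, PySem.Chars.len_eq, htl]
      exact PySem.Int.floordiv_natCast s.length kk
    rw [htimes, hslice, beq_iff_eq] at hpred
    have htoNat : ((s.length / kk : Nat) : Int).toNat = s.length / kk := Int.toNat_natCast _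
    rw [htoNat] at hpred
    have hlen : (s.length / kk) * kk = s.length := by
      have := congrArg List.length hpred
      simpa [List.length_flatten, List.map_replicate, List.sum_replicate, smul_eq_mul, htl] using this
    set m := s.length / kk with hm
    have hm2 : 2 ≤ m := by
      rcases Nat.lt_or_ge m 2 with h | h
      · interval_cases m <;> omega
      · exact h
    refine ⟨kk, hkk1, by omega, ?_⟩
    have hrot := rot_of_pow (s.take kk) m (by omega)
    rw [hpred, htl] at hrot
    exact hrot
  · rintro ⟨p, hp1, hp2, hprot⟩
    have H : ∃ i, 0 < i ∧ s.rotate i = s := ⟨p, by omega, hprot⟩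
    set d := Nat.find H with hdd
    obtain ⟨hdpos, hdrot⟩ := Nat.find_spec H
    have hdle : d ≤ p := Nat.find_le ⟨by omega, hprot⟩
    have hmin : ∀ i, 0 < i → i < d → s.rotate i ≠ s := by
      intro i hi0 hid hieq
      exact (Nat.find_min H hid) ⟨hi0, hieq⟩
    have hdvd : d ∣ s.length := rot_dvd s d s.length hdpos hdrot (List.rotate_length s) hmin
    obtain ⟨c, hc⟩ := hdvd
    have hc2 : 2 ≤ c := by
      rcases Nat.lt_or_ge c 2 with h | h
      · interval_cases c <;> omega
      · exact h
    have h2d : 2 * d ≤ s.length := by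
      calc 2 * d ≤ c * d := Nat.mul_le_mul_right d hc2
        _ = s.length := by rw [mul_comm, ← hc]
    have hdiv : s.length / d = c := by
      rw [hc]; exact Nat.mul_div_cancel_left c hdpos
    have hpow := pow_of_rot d c s (by rw [hc, mul_comm]) hdrot
    refine ⟨(d : Int), ?_, ?_⟩
    · rw [PySem.List.mem_pyRange_one, hfd2]
      have : d ≤ s.length / 2 := Nat.le_div_iff_mul_le (by omega) |>.mpr (by omega)
      omega
    · have hslice : PySem.Chars.slice s none (some (d : Int)) = s.take d := by
        rw [PySem.Chars.slice_eq_listSlice, PySem.List.slice_to_natCast]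
      have htl : (s.take d).length = d := by simp; omega
      have htimes : PySem.Int.floordiv (PySem.Chars.len s)
          (PySem.Chars.len (PySem.Chars.slice s none (some (d : Int)))) = ((s.length / d : Nat) : Int) := by
        rw [hslice, PySem.Chars.len_eq, PySem.Chars.len_eq, htl]
        exact PySem.Int.floordiv_natCast s.length d
      rw [htimes, hslice, beq_iff_eq]
      have htoNat : ((s.length / d : Nat) : Int).toNat = s.length / d := Int.toNat_natCast _
      rw [htoNat, hdiv, ← hpow]

-- B's test, characterized: the first occurrence of s in s++s after 0 lies before |s|
lemma B_core_iff (s : List Char) :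
    (decide ((1 : Int) < PySem.Chars.len s) &&
      decide (PySem.Chars.findFrom (s ++ s) s 1 < PySem.Chars.len s)) = true ↔ hasProperRot s := by
  rcases Nat.lt_or_ge s.length 2 with hn | hn
  · constructor
    · intro h
      simp only [Bool.and_eq_true, decide_eq_true_eq, PySem.Chars.len_eq] at h
      omega
    · rintro ⟨p, hp1, hp2, -⟩
      omega
  · have hn1 : (1:Nat) ≤ (s ++ s).length := by simp; omega
    have hiff := PySem.Chars.findFrom_natCast_eq_neg_one_iff (s++s) s 1 hn1
    norm_num at hiff
    have hne : PySem.Chars.findFrom (s ++ s) s 1 ≠ -1 := by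
      rw [Ne, hiff, not_not]
      have hd1 : (s ++ s).drop 1 = s.drop 1 ++ s := by
        rw [List.drop_append]
        have : 1 - s.length = 0 := by omega
        simp [this]
      rw [← List.drop_one, hd1]
      exact (List.suffix_append (s.drop 1) s).isInfix
    have hspec := PySem.Chars.findFrom_natCast_spec (s++s) s 1 hn1 (by norm_num; exact hne)
    norm_num at hspec
    obtain ⟨h1, h2, h3⟩ := hspec
    set g := PySem.Chars.findFrom (s ++ s) s 1 with hg
    have hgle : g.toNat ≤ s.length := by
      by_contra hlt
      rw [not_le] at hlt
      exact h3 s.length (by omega) (by omega) (by rw [List.drop_left])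
    constructor
    · intro h
      simp only [Bool.and_eq_true, decide_eq_true_eq, PySem.Chars.len_eq] at h
      refine ⟨g.toNat, by omega, by omega, ?_⟩
      exact (occ_iff_rot s g.toNat hgle).mp h2
    · rintro ⟨p, hp1, hp2, hrot⟩
      have hocc : s <+: (s ++ s).drop p := (occ_iff_rot s p (by omega)).mpr hrot
      have hglt : g.toNat < s.length := by
        by_contra hge
        rw [not_lt] at hge
        exact h3 p hp1 (by omega) hocc
      simp only [Bool.and_eq_true, decide_eq_true_eq, PySem.Chars.len_eq]
      omega

lemma portA_iff (num : Int) : is_invalid_id num = true ↔ hasProperRot (PySem.Int.toChars num) := by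
  unfold is_invalid_id
  exact A_core_iff (PySem.Int.toChars num)

lemma portB_iff (num : Int) : is_invalid_id_alt num = true ↔ hasProperRot (PySem.Int.toChars num) := by
  unfold is_invalid_id_alt
  exact B_core_iff (PySem.Int.toChars num)

-- ===== VERDICT (by name: the statement is the Claim_ definition above) =====
theorem is_invalid_id_spec : Claim_equal_is_invalid_id := by
  intro num _
  unfold Spec_is_invalid_id
  have h := (portA_iff num).trans (portB_iff num).symm
  cases hA : is_invalid_id num <;> cases hB : is_invalid_id_alt num <;> simp_all
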